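-- pv_equiv track=rewrite | github.com/JonasFiechter/Challenges | python/scrambled_letters.py | scrambled
-- ===== SOURCE A (Python) =====
-- def scrambled(_list, mask):
--     scrambled_list = []
--     for w in sorted([w for w in _list if len(w) == len(mask)]):
--         match = True
--         for index, letter in enumerate(w):
--             if letter != mask[index] and mask[index] != '*':
--                 match = False
--                 break
--
--         if match:
--             scrambled_list.append(w)
--
--     return scrambled_list
-- ===== SOURCE B (Python) =====
-- def scrambled(_list, mask):
--     # Hash-index approach: bucket the right-length words by their projection onto
--     # the mask's fixed (non-'*') positions, then look up the mask's own signature.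
--     fixed = [i for i, c in enumerate(mask) if c != '*']
--     sig = tuple(mask[i] for i in fixed)
--     buckets = {}
--     for w in _list:
--         if len(w) == len(mask):
--             key = tuple(w[i] for i in fixed)
--             buckets[key] = buckets.get(key, []) + [w]
--     return sorted(buckets.get(sig, []))
-- ===== Notes on version B (the rewrite author's own statement) =====
-- stated objective: alternative
-- what changed: A sorts all words of the mask's length and then runs a per-word indexed character loop with a match flag and break; B builds a hash index instead: it groups the right-length words into a dict keyed by each word's projection onto the mask's fixed (non-'*') positions and returns the single bucket at the mask's own signature, sorted — no per-word boolean match loop.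
import Mathlib
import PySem

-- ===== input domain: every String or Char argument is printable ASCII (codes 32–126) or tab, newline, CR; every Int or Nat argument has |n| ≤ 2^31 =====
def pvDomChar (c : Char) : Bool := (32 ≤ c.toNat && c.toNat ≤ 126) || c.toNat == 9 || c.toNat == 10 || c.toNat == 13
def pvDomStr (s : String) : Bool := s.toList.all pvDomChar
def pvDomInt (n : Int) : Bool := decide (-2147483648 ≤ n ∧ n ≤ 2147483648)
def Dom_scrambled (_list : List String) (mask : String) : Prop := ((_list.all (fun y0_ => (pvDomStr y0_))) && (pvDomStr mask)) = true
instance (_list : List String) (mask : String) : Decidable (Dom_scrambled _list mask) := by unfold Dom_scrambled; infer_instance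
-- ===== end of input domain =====

-- B replaces A's sort-then-test-each-word loop by a hash index: bucket right-length words by their projection onto the mask's fixed positions, then sort the single bucket looked up at the mask's signature.


-- ===== PORT A =====
-- inner 'for index, letter in enumerate(w): if letter != mask[index] and mask[index] != '*': match=False; break'
-- (the break makes this a recursion, not a fold; mask[index] is in range whenever scrambled calls it,
--  since only words with len(w) == len(mask) reach the loop — 'true' on the none branch is unreachable there)
def scrambledMatchA (mask : List Char) : List (Int × Char) → Bool
  | [] => true
  | (index, letter) :: rest =>
    match PySem.List.pyGet? mask index with
    | none => true
    | some m => if letter ≠ m ∧ m ≠ '*' then false else scrambledMatchA mask rest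

def scrambled (_list : List String) (mask : String) : List String :=
  (PySem.List.sorted (_list.filter (fun w => PySem.Str.len w == PySem.Str.len mask)) (fun x => x) false).foldl
    (fun scrambled_list w =>
      if scrambledMatchA mask.toList (PySem.List.enumerate w.toList 0) then scrambled_list ++ [w]
      else scrambled_list) []

-- ===== PORT B =====
-- fixed = [i for i, c in enumerate(mask) if c != '*']; sig / key project onto those indices
-- (mask[i] / w[i] ported as pyGetD with a dummy default: every i in fixed is a valid index of mask,
--  and of w when len(w) == len(mask), which is the only case a key is built)
def scrambled_alt (_list : List String) (mask : String) : List String :=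
  let fixed : List Int := ((PySem.List.enumerate mask.toList 0).filter (fun p => p.2 ≠ '*')).map (·.1)
  let sig : List Char := fixed.map (fun i => PySem.List.pyGetD mask.toList i ' ')
  let buckets : PySem.Dict (List Char) (List String) :=
    _list.foldl (fun d w =>
      if PySem.Str.len w == PySem.Str.len mask then
        d.modify (fixed.map (fun i => PySem.List.pyGetD w.toList i ' ')) [] (· ++ [w])
      else d) PySem.Dict.empty
  PySem.List.sorted (buckets.getD sig []) (fun x => x) false

-- ===== PRECONDITION & SPEC =====
def Spec_scrambled (_list : List String) (mask : String) (out : List String) : Prop := out = scrambled_alt _list mask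
instance (_list : List String) (mask : String) (out : List String) : Decidable (Spec_scrambled _list mask out) := by unfold Spec_scrambled; infer_instance

-- ===== CLAIM (what is proved, stated in full; the proofs are below) =====
def Claim_equal_scrambled : Prop := ∀ (_list : List String) (mask : String), Dom_scrambled _list mask → Spec_scrambled _list mask (scrambled _list mask)

-- ===== LEMMAS AND PROOFS =====

-- A's inner loop, started past a processed prefix 'done' of the mask, is the zip/all test on the rest.
lemma scrambledMatchA_eq (w : List Char) : ∀ (done rest : List Char), w.length = rest.length →
    scrambledMatchA (done ++ rest) (PySem.List.enumerate w (done.length : Int))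
      = (w.zip rest).all (fun p => p.2 == '*' || p.1 == p.2) := by
  induction w with
  | nil => intro done rest h; simp [scrambledMatchA, PySem.List.enumerate_nil]
  | cons c w' ih =>
    intro done rest h
    cases rest with
    | nil => simp at h
    | cons m rest' =>
      rw [PySem.List.enumerate_cons]
      have hget : PySem.List.pyGet? (done ++ m :: rest') (done.length : Int) = some m :=
        PySem.List.pyGet?_append_length done rest' m
      have hlen : w'.length = rest'.length := by simpa using h
      have := ih (done ++ [m]) rest' hlen
      simp only [scrambledMatchA, hget, List.zip_cons_cons, List.all_cons]
      by_cases hcm : c = m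
      · by_cases hm : m = '*' <;> simp_all [List.append_assoc]
      · by_cases hm : m = '*' <;> simp_all [List.append_assoc]

-- filtering commutes with the (stable) sort under the identity key
lemma filter_sorted_comm (l : List String) (q : String → Bool) :
    (PySem.List.sorted l (fun x => x) false).filter q
      = PySem.List.sorted (l.filter q) (fun x => x) false := by
  refine (PySem.List.sorted_id_eq_of_perm_of_pairwise _ _ ?_ ?_).symm
  · exact (PySem.List.sorted_perm l (fun x => x) false).filter q
  · exact (PySem.List.sorted_pairwise l (fun x => x)).filter q

-- membership in enumerate: exactly the indexed elements
lemma mem_enumerate_iff (l : List Char) : ∀ (s : Int) (p : Int × Char),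
    p ∈ PySem.List.enumerate l s ↔ ∃ k : Nat, ∃ hk : k < l.length, p.1 = s + k ∧ p.2 = l[k] := by
  induction l with
  | nil => intro s p; simp [PySem.List.enumerate_nil]
  | cons c l' ih =>
    intro s p
    rw [PySem.List.enumerate_cons, List.mem_cons, ih]
    constructor
    · rintro (rfl | ⟨k, hk, h1, h2⟩)
      · exact ⟨0, by simp, by simp, by simp⟩
      · refine ⟨k + 1, by simpa using Nat.succ_lt_succ hk, ?_, by simpa using h2⟩
        push_cast
        omega
    · rintro ⟨k, hk, h1, h2⟩
      cases k with
      | zero =>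
        left; obtain ⟨p1, p2⟩ := p; simp_all
      | succ k' =>
        right
        refine ⟨k', by simpa using Nat.lt_of_succ_lt_succ hk, ?_, by simpa using h2⟩
        push_cast at h1
        omega

-- the signature comparison equals the per-character wildcard test, for equal-length words
lemma sig_eq_iff (w m : List Char) (h : w.length = m.length) :
    ((((PySem.List.enumerate m 0).filter (fun p => p.2 ≠ '*')).map (·.1)).map
        (fun i => PySem.List.pyGetD w i ' ')
      == (((PySem.List.enumerate m 0).filter (fun p => p.2 ≠ '*')).map (·.1)).map
        (fun i => PySem.List.pyGetD m i ' '))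
      = (w.zip m).all (fun p => p.2 == '*' || p.1 == p.2) := by
  have hiff : (∀ i ∈ ((PySem.List.enumerate m 0).filter (fun p => p.2 ≠ '*')).map (·.1),
        PySem.List.pyGetD w i ' ' = PySem.List.pyGetD m i ' ')
      ↔ ((w.zip m).all (fun p => p.2 == '*' || p.1 == p.2) = true) := by
    constructor
    · intro hp
      rw [List.all_eq_true]
      intro x hx
      obtain ⟨k, hk, hget⟩ := List.mem_iff_getElem.mp hx
      have hkw : k < w.length := by rw [List.length_zip] at hk; omega
      have hkm : k < m.length := by rw [List.length_zip] at hk; omega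
      rw [List.getElem_zip] at hget
      subst hget
      by_cases hstar : m[k] = '*'
      · simp [hstar]
      · have hmem : ((k : Int)) ∈ ((PySem.List.enumerate m 0).filter (fun p => p.2 ≠ '*')).map (·.1) := by
          rw [List.mem_map]
          refine ⟨((k : Int), m[k]), ?_, rfl⟩
          rw [List.mem_filter, mem_enumerate_iff]
          exact ⟨⟨k, hkm, by simp, rfl⟩, by simpa using hstar⟩
        have := hp _ hmem
        rw [PySem.List.pyGetD_natCast, PySem.List.pyGetD_natCast,
            List.getD_eq_getElem _ _ hkw, List.getD_eq_getElem _ _ hkm] at this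
        simp [this]
    · intro hall i hi
      rw [List.mem_map] at hi
      obtain ⟨p, hp, hfst⟩ := hi
      rw [List.mem_filter, mem_enumerate_iff] at hp
      obtain ⟨⟨k, hkm, h1, h2⟩, hstar⟩ := hp
      have hkw : k < w.length := by omega
      have hx : (w[k], m[k]) ∈ w.zip m := by
        rw [List.mem_iff_getElem]
        exact ⟨k, by rw [List.length_zip]; omega, by rw [List.getElem_zip]⟩
      have := (List.all_eq_true.mp hall) _ hx
      have hwk : w[k] = m[k] := by
        rcases Bool.or_eq_true_iff.mp this with hm | he
        · exact absurd (by simpa using hm) (by simpa [h2] using hstar)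
        · simpa using he
      rw [← hfst, h1]
      simp only [zero_add, PySem.List.pyGetD_natCast,
        List.getD_eq_getElem _ _ hkw, List.getD_eq_getElem _ _ hkm, hwk]
  rw [Bool.eq_iff_iff, beq_iff_eq, List.map_eq_map_iff]
  exact hiff

-- ===== VERDICT (by name: the statement is the Claim_ definition above) =====
theorem scrambled_spec : Claim_equal_scrambled := by
  intro _list mask _
  show scrambled _list mask = scrambled_alt _list mask
  unfold scrambled scrambled_alt
  simp only []
  -- A side: fold-with-append is a filter over the sorted list
  have hfold := PySem.List.foldl_append_if
      (fun w : String => scrambledMatchA mask.toList (PySem.List.enumerate w.toList 0))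
      (fun w : String => w)
      (PySem.List.sorted (_list.filter (fun w => PySem.Str.len w == PySem.Str.len mask)) (fun x => x) false)
      []
  rw [hfold, List.nil_append, List.map_id']
  rw [List.filter_congr (q := fun w =>
        (w.toList.zip mask.toList).all (fun p => p.2 == '*' || p.1 == p.2)) ?_]
  swap
  · intro w hw
    have hw' := hw
    rw [PySem.List.mem_sorted] at hw'
    have hlen : w.toList.length = mask.toList.length := by
      have := (List.mem_filter.mp hw').2
      simp only [beq_iff_eq, PySem.Str.len_eq] at this
      exact_mod_cast this
    simpa using scrambledMatchA_eq w.toList [] mask.toList hlen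
  rw [filter_sorted_comm, List.filter_filter]
  -- B side: the bucket-building fold, read back at the mask's signature, is a filter
  rw [← List.foldl_filter, ← List.foldl_map
        (f := fun w : String =>
          ((((PySem.List.enumerate mask.toList 0).filter (fun p => p.2 ≠ '*')).map (·.1)).map
            (fun i => PySem.List.pyGetD w.toList i ' '), w))
        (g := fun (d : PySem.Dict (List Char) (List String)) (p : List Char × String) =>
          d.modify p.1 [] (· ++ [p.2]))]
  rw [PySem.Dict.getD_foldl_modify_append, PySem.Dict.getD_empty, List.nil_append,
      List.filter_map, List.map_map]
  simp only [Function.comp_def, List.map_id']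
  rw [List.filter_filter]
  congr 1
  apply List.filter_congr
  intro w _
  by_cases hl : (PySem.Str.len w == PySem.Str.len mask) = true
  · have hlen : w.toList.length = mask.toList.length := by
      simp only [beq_iff_eq, PySem.Str.len_eq] at hl
      exact_mod_cast hl
    rw [hl, Bool.and_true, Bool.and_true, sig_eq_iff w.toList mask.toList hlen]
  · rw [Bool.not_eq_true] at hl
    rw [hl, Bool.and_false, Bool.and_false]
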